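-- pv_equiv track=rewrite | github.com/Mylanos/Accident-analysis-in-Czechia | get_stat.py | yearly_stats_by_regions
-- ===== SOURCE A (Python) =====
-- def yearly_stats_by_regions(region_stats):
--     """processes occurances of a crash by a year in given regions"""
--     stats = {}
--     for region in region_stats.keys():
--         for year, occurance in sorted(region_stats[region].items()):
--             if year not in stats.keys():
--                 stats[year] = [occurance]
--             else:
--                 stats[year].append(occurance)
--     return stats
-- ===== SOURCE B (Python) =====
-- def yearly_stats_by_regions(region_stats):
--     """processes occurances of a crash by a year in given regions"""
--     cols = list(region_stats.values())
--     order = dict.fromkeys(y for ys in cols for y in sorted(ys))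
--     return {y: [ys[y] for ys in cols if y in ys] for y in order}
-- ===== Notes on version B (the rewrite author's own statement) =====
-- stated objective: alternative
-- what changed: A scatters region-major into a mutable dict of lists (insert-or-append per (year,occurrence)); B first collects the ordered set of distinct years from all regions' sorted key lists, then builds each year's list in one year-major gather pass over the regions.
import Mathlib
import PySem

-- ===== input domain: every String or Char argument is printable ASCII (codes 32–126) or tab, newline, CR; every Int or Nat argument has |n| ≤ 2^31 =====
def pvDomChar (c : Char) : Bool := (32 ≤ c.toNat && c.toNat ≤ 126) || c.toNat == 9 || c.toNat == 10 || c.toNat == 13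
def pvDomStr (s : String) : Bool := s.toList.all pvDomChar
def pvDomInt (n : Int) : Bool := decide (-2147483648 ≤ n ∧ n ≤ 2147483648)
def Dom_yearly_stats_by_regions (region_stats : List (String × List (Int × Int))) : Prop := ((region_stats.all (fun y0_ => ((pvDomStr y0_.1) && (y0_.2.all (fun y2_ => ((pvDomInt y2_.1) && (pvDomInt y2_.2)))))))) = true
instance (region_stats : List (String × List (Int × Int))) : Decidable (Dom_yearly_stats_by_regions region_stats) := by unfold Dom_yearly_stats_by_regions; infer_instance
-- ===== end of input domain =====

-- B replaces A's region-major dict mutation by a two-phase year-major gather (collect the ordered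
-- distinct years, then build each year's list in one pass over the regions); objective: alternative
-- decomposition, same asymptotic cost.


-- ===== PORT A =====
-- the body of A's inner loop: 'if year not in stats.keys(): stats[year] = [occ] else: stats[year].append(occ)'
-- ('append' mutates the stored list in place = overwrite the key's value keeping its position, which is Dict.insert)
def pyStepA (stats : PySem.Dict Int (List Int)) (p : Int × Int) : PySem.Dict Int (List Int) :=
  if !(stats.contains p.1) then stats.insert p.1 [p.2]
  else stats.insert p.1 (((stats.get? p.1).getD []) ++ [p.2])

-- 'for region in region_stats.keys(): … region_stats[region] …' visits the dict's entries in
-- insertion order, i.e. the pairs of the association list (exact: a dict's keys are unique, see Pre_).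
-- 'sorted(region_stats[region].items())' sorts the items by key (exact: an inner dict's keys are
-- unique, so CPython's lexicographic tuple order coincides with order by first component).
def yearly_stats_by_regions (region_stats : List (String × List (Int × Int))) : List (Int × List Int) :=
  (region_stats.foldl
    (fun stats r => (PySem.List.sorted r.2 (fun p => p.1) false).foldl pyStepA stats)
    PySem.Dict.empty).items

-- ===== PORT B =====
def yearly_stats_by_regions_alt (region_stats : List (String × List (Int × Int))) : List (Int × List Int) :=
  let cols := region_stats.map (fun r => r.2)
  -- order = dict.fromkeys(y for ys in cols for y in sorted(ys))   (sorted(dict) sorts its keys)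
  let order := PySem.List.dedup (cols.flatMap (fun ys => PySem.List.sorted (ys.map (fun p => p.1)) (fun y => y) false))
  -- {y: [ys[y] for ys in cols if y in ys] for y in order}
  order.map (fun y => (y, cols.filterMap (fun ys => (ys.find? (fun p => p.1 == y)).map (fun p => p.2))))

-- ===== PRECONDITION & SPEC =====
-- Pre_ only rules out association lists with duplicate keys (outer or inner), which cannot arise
-- from A's Python dict[str, dict[int, int]] argument; it excludes no input the Python A accepts.
def Pre_yearly_stats_by_regions (region_stats : List (String × List (Int × Int))) : Prop :=
  (region_stats.map Prod.fst).Nodup ∧ ∀ r ∈ region_stats, (r.2.map Prod.fst).Nodup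
instance (region_stats : List (String × List (Int × Int))) : Decidable (Pre_yearly_stats_by_regions region_stats) := by unfold Pre_yearly_stats_by_regions; infer_instance

def pvWitness_yearly_stats_by_regions : (List (String × List (Int × Int))) :=
  [("PHA", [(2020, 3), (2019, 5)]), ("JHM", [(2019, 2)])]

def Spec_yearly_stats_by_regions (region_stats : List (String × List (Int × Int))) (out : List (Int × List Int)) : Prop := out = yearly_stats_by_regions_alt region_stats
instance (region_stats : List (String × List (Int × Int))) (out : List (Int × List Int)) : Decidable (Spec_yearly_stats_by_regions region_stats out) := by unfold Spec_yearly_stats_by_regions; infer_instance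

-- ===== CLAIM (what is proved, stated in full; the proofs are below) =====
def Claim_equal_yearly_stats_by_regions : Prop := ∀ (region_stats : List (String × List (Int × Int))), Dom_yearly_stats_by_regions region_stats → Pre_yearly_stats_by_regions region_stats → Spec_yearly_stats_by_regions region_stats (yearly_stats_by_regions region_stats)

-- ===== LEMMAS AND PROOFS =====

-- the occurrence one region's table contributes to year y ([] if the region lacks y)
def extOf (ys : List (Int × Int)) (y : Int) : List Int :=
  match ys.find? (fun p => p.1 == y) with
  | some q => [q.2]
  | none => []

-- one region's sorted key list
def kbOf (ys : List (Int × Int)) : List Int :=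
  PySem.List.sorted (ys.map (fun p => p.1)) (fun y => y) false

-- the per-year gathered list, and the whole result in year-major form
def gOf (rs : List (String × List (Int × Int))) (y : Int) : List Int :=
  rs.filterMap (fun r => (r.2.find? (fun p => p.1 == y)).map (fun p => p.2))

def yearsOf (rs : List (String × List (Int × Int))) : List Int :=
  PySem.List.dedup (rs.flatMap (fun r => kbOf r.2))

def gatherOf (rs : List (String × List (Int × Int))) : List (Int × List Int) :=
  (yearsOf rs).map (fun y => (y, gOf rs y))

theorem alt_eq_gather (rs : List (String × List (Int × Int))) :
    yearly_stats_by_regions_alt rs = gatherOf rs := by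
  simp [yearly_stats_by_regions_alt, gatherOf, yearsOf, gOf, kbOf,
    List.flatMap_map, List.filterMap_map, Function.comp]

theorem find?_eq_some_of_mem {α : Type} (L : List (Int × α)) (q : Int × α)
    (hnd : (L.map Prod.fst).Nodup) (hq : q ∈ L) :
    L.find? (fun p => p.1 == q.1) = some q := by
  induction L with
  | nil => simp at hq
  | cons h t ih =>
    simp only [List.map_cons, List.nodup_cons] at hnd
    rcases List.mem_cons.1 hq with rfl | hqt
    · simp
    · have hne : h.1 ≠ q.1 := by
        intro he
        exact hnd.1 (he ▸ List.mem_map_of_mem hqt)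
      rw [List.find?_cons_of_neg (by simp [hne]), ih hnd.2 hqt]

theorem find?_perm {α : Type} (L M : List (Int × α)) (hp : L.Perm M)
    (hnd : (M.map Prod.fst).Nodup) (y : Int) :
    L.find? (fun p => p.1 == y) = M.find? (fun p => p.1 == y) := by
  by_cases hmem : ∃ q ∈ M, q.1 = y
  · obtain ⟨q, hqM, rfl⟩ := hmem
    rw [find?_eq_some_of_mem M q hnd hqM,
        find?_eq_some_of_mem L q (((hp.map Prod.fst).nodup_iff).2 hnd) (hp.mem_iff.2 hqM)]
  · push_neg at hmem
    rw [List.find?_eq_none.2 (fun q hq => by simp [hmem q (hp.mem_iff.1 hq)]),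
        List.find?_eq_none.2 (fun q hq => by simp [hmem q hq])]

theorem extOf_eq_nil_of_not_mem (L : List (Int × Int)) (y : Int) (h : y ∉ L.map Prod.fst) :
    extOf L y = [] := by
  rw [extOf, List.find?_eq_none.2 (fun q hq => by simp; rintro rfl; exact h (List.mem_map_of_mem hq))]

theorem extOf_cons_of_eq (q : Int × Int) (L : List (Int × Int)) (y : Int) (h : q.1 = y) :
    extOf (q :: L) y = [q.2] := by
  rw [extOf, List.find?_cons_of_pos (by simp [h])]

theorem extOf_cons_of_ne (q : Int × Int) (L : List (Int × Int)) (y : Int) (h : q.1 ≠ y) :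
    extOf (q :: L) y = extOf L y := by
  rw [extOf, List.find?_cons_of_neg (by simp [h]), extOf]

theorem extOf_sorted (ys : List (Int × Int)) (hnd : (ys.map Prod.fst).Nodup) (y : Int) :
    extOf (PySem.List.sorted ys (fun p => p.1) false) y = extOf ys y := by
  rw [extOf, extOf, find?_perm _ _ (PySem.List.sorted_perm ys (fun p => p.1) false) hnd y]

theorem map_fst_sorted (ys : List (Int × Int)) (hnd : (ys.map Prod.fst).Nodup) :
    (PySem.List.sorted ys (fun p => p.1) false).map Prod.fst = kbOf ys := by
  unfold kbOf
  have hperm : ((PySem.List.sorted ys (fun p => p.1) false).map Prod.fst).Perm (ys.map Prod.fst) :=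
    (PySem.List.sorted_perm ys (fun p => p.1) false).map Prod.fst
  have hnd' : ((PySem.List.sorted ys (fun p => p.1) false).map Prod.fst).Nodup :=
    hperm.nodup_iff.2 hnd
  have hle : ((PySem.List.sorted ys (fun p => p.1) false).map Prod.fst).Pairwise (· ≤ ·) :=
    List.pairwise_map.2 (PySem.List.sorted_pairwise ys (fun p => p.1))
  exact (PySem.List.sorted_eq_of_perm_of_pairwise_lt _ _ _ hperm
    ((hle.and hnd').imp (fun h => lt_of_le_of_ne h.1 h.2))).symm

theorem kbOf_nodup (ys : List (Int × Int)) (hnd : (ys.map Prod.fst).Nodup) : (kbOf ys).Nodup := by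
  unfold kbOf
  exact ((PySem.List.sorted_perm (ys.map (fun p => p.1)) (fun y => y) false).nodup_iff).2 hnd

theorem inner_loop (L : List (Int × Int)) (S : List (Int × List Int))
    (hL : (L.map Prod.fst).Nodup) (hS : (S.map Prod.fst).Nodup) :
    (L.foldl pyStepA (PySem.Dict.mk S)).items
      = S.map (fun p => (p.1, p.2 ++ extOf L p.1))
        ++ (L.filter (fun q => !(S.any (fun p => p.1 == q.1)))).map (fun q => (q.1, [q.2])) := by
  induction L generalizing S with
  | nil => simp [extOf]
  | cons q L' ih =>
    simp only [List.map_cons, List.nodup_cons] at hL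
    obtain ⟨hq1, hL'⟩ := hL
    rw [List.foldl_cons]
    by_cases hc : S.any (fun p => p.1 == q.1) = true
    · -- key q.1 already present: the step overwrites its (unique) entry in place
      obtain ⟨p0, hp0S, hp0e⟩ := List.any_eq_true.1 hc
      have hp0 : p0.1 = q.1 := beq_iff_eq.1 hp0e
      have hfind : S.find? (fun p => p.1 == q.1) = some p0 := by
        have := find?_eq_some_of_mem S p0 hS hp0S
        rwa [hp0] at this
      have hstep : pyStepA (PySem.Dict.mk S) q
          = PySem.Dict.mk (S.map (fun p => if p.1 == q.1 then (q.1, p0.2 ++ [q.2]) else p)) := by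
        simp [pyStepA, PySem.Dict.contains, PySem.Dict.insert, PySem.Dict.get?, hc, hfind]
      rw [hstep]
      have hfst : ∀ p ∈ S, ((fun p => if p.1 == q.1 then (q.1, p0.2 ++ [q.2]) else p) p).1 = p.1 := by
        intro p _
        by_cases hpq : p.1 = q.1 <;> simp [hpq]
      have hfsteq : (S.map (fun p => if p.1 == q.1 then (q.1, p0.2 ++ [q.2]) else p)).map Prod.fst
          = S.map Prod.fst := by
        rw [List.map_map]
        exact List.map_congr_left hfst
      have hS1 : ((S.map (fun p => if p.1 == q.1 then (q.1, p0.2 ++ [q.2]) else p)).map Prod.fst).Nodup := by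
        rw [hfsteq]; exact hS
      rw [ih _ hL' hS1]
      have hext : extOf L' q.1 = [] := extOf_eq_nil_of_not_mem _ _ hq1
      congr 1
      · -- the mapped (old keys) part
        rw [List.map_map]
        refine List.map_congr_left ?_
        intro p hp
        by_cases hpq : p.1 = q.1
        · have hpp0 : p = p0 := List.inj_on_of_nodup_map hS hp hp0S (by rw [hpq, hp0])
          simp [Function.comp, hpp0, hp0, hext]
          exact (extOf_cons_of_eq q L' q.1 rfl).symm
        · simp only [Function.comp, beq_iff_eq, hpq, ite_false]
          rw [extOf_cons_of_ne q L' p.1 (fun he => hpq he.symm)]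
      · -- the filtered (new keys) part
        rw [List.filter_cons_of_neg (by simp [hc])]
        refine congrArg _ (List.filter_congr ?_)
        intro q' hq'
        rw [List.any_map]
        refine congrArg _ (congrArg _ ?_)
        funext p
        by_cases hpq : p.1 = q.1 <;> simp [hpq]
    · -- key q.1 new: the step appends (q.1, [q.2]) at the end
      have hc' : (PySem.Dict.mk S).contains q.1 = false := by
        simpa [PySem.Dict.contains] using eq_false_of_ne_true hc
      have hstep : pyStepA (PySem.Dict.mk S) q = PySem.Dict.mk (S ++ [(q.1, [q.2])]) := by
        simp [pyStepA, PySem.Dict.insert, hc']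
      rw [hstep]
      have hnotin : q.1 ∉ S.map Prod.fst := by
        simp only [List.any_eq_true, beq_iff_eq] at hc
        simp only [List.mem_map]
        rintro ⟨p, hp, hpe⟩; exact hc ⟨p, hp, hpe⟩
      have hS' : ((S ++ [(q.1, [q.2])]).map Prod.fst).Nodup := by
        simp only [List.map_append, List.map_cons, List.map_nil]
        simp [List.nodup_append, hS]
        intro a x hax he
        exact hnotin (he ▸ List.mem_map_of_mem hax)
      rw [ih _ hL' hS']
      have hext : extOf L' q.1 = [] := extOf_eq_nil_of_not_mem _ _ hq1
      rw [List.filter_cons_of_pos (by simp [hc])]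
      simp only [List.map_append, List.map_cons, List.map_nil, hext, List.append_nil]
      rw [List.append_assoc]
      congr 1
      · refine List.map_congr_left ?_
        intro p hp
        have hpq : q.1 ≠ p.1 := fun he => hnotin (he ▸ List.mem_map_of_mem hp)
        rw [extOf_cons_of_ne q L' p.1 hpq]
      · have hfilter : L'.filter (fun q' => !((S ++ [(q.1, [q.2])]).any (fun p => p.1 == q'.1)))
            = L'.filter (fun q' => !(S.any (fun p => p.1 == q'.1))) := by
          refine List.filter_congr ?_
          intro q' hq'
          have : q.1 ≠ q'.1 := fun he => hq1 (he ▸ List.mem_map_of_mem hq')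
          simp [List.any_append, this]
        rw [hfilter]
        simp

theorem gOf_nil (rs : List (String × List (Int × Int))) (y : Int) (h : y ∉ yearsOf rs) :
    gOf rs y = [] := by
  rw [gOf, List.filterMap_eq_nil_iff]
  intro r hr
  simp only [yearsOf, PySem.List.dedup_eq_ofList, PySem.Set.mem_ofList, List.mem_flatMap] at h
  push_neg at h
  have : y ∉ r.2.map Prod.fst := by
    have := h r hr
    simpa [kbOf, PySem.List.mem_sorted] using this
  rw [List.find?_eq_none.2 (fun q hq => by simp; rintro rfl; exact this (List.mem_map_of_mem hq))]
  simp

theorem gOf_append (rs : List (String × List (Int × Int))) (r : String × List (Int × Int)) (y : Int) :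
    gOf (rs ++ [r]) y = gOf rs y ++ extOf r.2 y := by
  simp only [gOf, List.filterMap_append, List.filterMap_cons, List.filterMap_nil]
  congr 1
  cases h : r.2.find? (fun p => p.1 == y) <;> simp [extOf, h]

theorem years_append (rs : List (String × List (Int × Int))) (r : String × List (Int × Int))
    (hr2 : (r.2.map Prod.fst).Nodup) :
    yearsOf (rs ++ [r]) = yearsOf rs ++ (kbOf r.2).filter (fun y => !((yearsOf rs).contains y)) := by
  simp only [yearsOf, List.flatMap_append, List.flatMap_cons, List.flatMap_nil, List.append_nil,
    PySem.List.dedup_eq_ofList]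
  rw [PySem.Set.ofList_append, PySem.Set.update_eq_append_filter,
    PySem.Set.ofList_eq_self_of_nodup _ (kbOf_nodup r.2 hr2)]
  rfl

theorem main_eq (rs : List (String × List (Int × Int))) :
    Pre_yearly_stats_by_regions rs → yearly_stats_by_regions rs = gatherOf rs := by
  unfold yearly_stats_by_regions
  induction rs using List.reverseRecOn with
  | nil => intro _; rfl
  | append_singleton rs r ih =>
    intro hpre
    have hnd_rs : (rs.map Prod.fst).Nodup := by
      have h1 := hpre.1
      simp only [List.map_append] at h1
      exact List.Nodup.sublist (List.sublist_append_left _ _) h1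
    have hpre_rs : Pre_yearly_stats_by_regions rs :=
      ⟨hnd_rs, fun x hx => hpre.2 x (List.mem_append_left _ hx)⟩
    have hr2 : (r.2.map Prod.fst).Nodup := hpre.2 r (by simp)
    have hLfst : (PySem.List.sorted r.2 (fun p => p.1) false).map Prod.fst = kbOf r.2 :=
      map_fst_sorted r.2 hr2
    have hLnd : ((PySem.List.sorted r.2 (fun p => p.1) false).map Prod.fst).Nodup := by
      rw [hLfst]; exact kbOf_nodup r.2 hr2
    have hGfst : (gatherOf rs).map Prod.fst = yearsOf rs := by
      rw [gatherOf, List.map_map]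
      simp [Function.comp_def]
    have hGnd : ((gatherOf rs).map Prod.fst).Nodup := by
      rw [hGfst]; exact PySem.List.nodup_dedup _
    rw [List.foldl_append]
    have heta : rs.foldl
        (fun stats r => (PySem.List.sorted r.2 (fun p => p.1) false).foldl pyStepA stats)
        PySem.Dict.empty
        = PySem.Dict.mk ((rs.foldl
            (fun stats r => (PySem.List.sorted r.2 (fun p => p.1) false).foldl pyStepA stats)
            PySem.Dict.empty).items) := rfl
    rw [heta, ih hpre_rs]
    simp only [List.foldl_cons, List.foldl_nil]
    rw [inner_loop _ _ hLnd hGnd]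
    -- decompose the year-major form of rs ++ [r]
    have hgr : gatherOf (rs ++ [r])
        = (yearsOf rs).map (fun y => (y, gOf (rs ++ [r]) y))
          ++ ((kbOf r.2).filter (fun y => !((yearsOf rs).contains y))).map
              (fun y => (y, gOf (rs ++ [r]) y)) := by
      rw [gatherOf, years_append rs r hr2, List.map_append]
    rw [hgr]
    congr 1
    · -- old years: appending region r extends each year's list by that region's contribution
      rw [gatherOf, List.map_map]
      refine List.map_congr_left ?_
      intro y _
      simp only [Function.comp]
      rw [gOf_append rs r y, extOf_sorted r.2 hr2 y]
    · -- new years of region r, in sorted key order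
      rw [← hLfst, List.filter_map, List.map_map]
      have hpred : (fun q : Int × Int => !((gatherOf rs).any (fun p => p.1 == q.1)))
          = ((fun y => !((yearsOf rs).contains y)) ∘ (Prod.fst : Int × Int → Int)) := by
        funext q
        rw [gatherOf, List.any_map]
        simp [Function.comp_def, List.any_beq', List.contains_eq_mem]
      rw [← hpred]
      refine List.map_congr_left ?_
      intro q hq
      have hqL : q ∈ PySem.List.sorted r.2 (fun p => p.1) false := (List.mem_filter.1 hq).1
      have hqnew : q.1 ∉ yearsOf rs := by
        intro hmem
        have hpmem : (q.1, gOf rs q.1) ∈ gatherOf rs := by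
          rw [gatherOf]; exact List.mem_map_of_mem hmem
        have h2 := (List.mem_filter.1 hq).2
        rw [Bool.not_eq_true', List.any_eq_false] at h2
        exact absurd (h2 _ hpmem) (by simp)
      have hfind : (PySem.List.sorted r.2 (fun p => p.1) false).find? (fun p => p.1 == q.1)
          = some q := find?_eq_some_of_mem _ q hLnd hqL
      simp only [Function.comp]
      rw [gOf_append rs r q.1, gOf_nil rs q.1 hqnew, extOf_sorted r.2 hr2 q.1 |>.symm, extOf, hfind]
      simp

-- ===== VERDICT (by name: the statement is the Claim_ definition above) =====
theorem yearly_stats_by_regions_spec : Claim_equal_yearly_stats_by_regions := by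
  intro rs _ hpre
  unfold Spec_yearly_stats_by_regions
  rw [alt_eq_gather, main_eq rs hpre]
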